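-- pv_equiv track=rewrite | github.com/vinaynv3/Algorithms-DataStructures | SearchSort/BubbleSort.py | short_bubble_sort
-- ===== SOURCE A (Python) =====
-- def short_bubble_sort(alist):
--
--     stop = False
--     total_swaps = 0
--     position = len(alist)-1
--
--     while position > 0 and not stop:
--
--         stop = True
--         for i in range(position):
--             if alist[i] > alist[i+1]:
--                 alist[i],alist[i+1] = alist[i+1], alist[i]
--                 total_swaps +=1
--                 stop = False
--         position -=1
--
--     return (alist, total_swaps)
-- ===== SOURCE B (Python) =====
-- def short_bubble_sort(alist):
--     # Merge sort counting inversions: the inversion count equals bubble sort's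
--     # swap count. Note: A sorts alist in place; B leaves the argument unchanged
--     # (same return value).
--     def sort_count(xs):
--         if len(xs) <= 1:
--             return xs, 0
--         mid = len(xs) // 2
--         left, lc = sort_count(xs[:mid])
--         right, rc = sort_count(xs[mid:])
--         merged = []
--         inv = 0
--         i = 0
--         j = 0
--         while i < len(left) and j < len(right):
--             if right[j] < left[i]:
--                 merged.append(right[j])
--                 inv += len(left) - i
--                 j += 1
--             else:
--                 merged.append(left[i])
--                 i += 1
--         merged = merged + left[i:] + right[j:]
--         return merged, lc + rc + inv
--     return sort_count(alist)
-- ===== Notes on version B (the rewrite author's own statement) =====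
-- stated objective: faster
-- what changed: Replaces the early-exit bubble sort (repeated adjacent-swap passes) by a merge sort that counts inversions during the merge; the inversion count equals bubble sort's total swap count, and B returns a new sorted list instead of mutating the argument in place.
import Mathlib
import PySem

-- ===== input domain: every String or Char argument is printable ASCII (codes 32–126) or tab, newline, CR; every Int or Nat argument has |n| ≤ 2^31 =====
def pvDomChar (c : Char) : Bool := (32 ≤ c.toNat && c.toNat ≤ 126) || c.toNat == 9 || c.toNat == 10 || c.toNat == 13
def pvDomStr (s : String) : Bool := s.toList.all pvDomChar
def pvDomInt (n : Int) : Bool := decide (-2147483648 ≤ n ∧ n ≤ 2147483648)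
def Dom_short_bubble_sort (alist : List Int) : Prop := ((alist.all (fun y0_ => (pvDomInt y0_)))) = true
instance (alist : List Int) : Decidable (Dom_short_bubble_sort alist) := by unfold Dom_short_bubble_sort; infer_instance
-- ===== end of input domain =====

-- B replaces A's early-exit bubble sort by a merge sort counting inversions (same return
-- value: sorted list and swap count = inversion count); A sorts its argument in place while
-- B does not mutate it — the equivalence proved here is about the return value.

-- ===== PORT A =====
-- one iteration of "for i in range(position)": state (alist, total_swaps, stop)
def pvBubbleStep (st : List Int × Int × Bool) (i : Int) : List Int × Int × Bool :=
  if PySem.List.pyGetD st.1 (i + 1) 0 < PySem.List.pyGetD st.1 i 0 then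
    (PySem.List.pySetD (PySem.List.pySetD st.1 i (PySem.List.pyGetD st.1 (i + 1) 0)) (i + 1)
       (PySem.List.pyGetD st.1 i 0),
     st.2.1 + 1, false)
  else st

-- the "while position > 0 and not stop" loop
def pvBubbleLoop (l : List Int) (stop : Bool) (total : Int) (position : Int) :
    List Int × Int :=
  if h : position > 0 ∧ stop = false then
    -- stop = True at the start of each pass, then the for-loop over range(position)
    let st := (PySem.List.pyRange 0 position 1).foldl pvBubbleStep (l, total, true)
    pvBubbleLoop st.1 st.2.2 st.2.1 (position - 1)
  else (l, total)
termination_by position.toNat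
decreasing_by omega

def short_bubble_sort (alist : List Int) : List Int × Int :=
  pvBubbleLoop alist false 0 (PySem.List.len alist - 1)

-- ===== PORT B =====
-- the "while i < len(left) and j < len(right)" merge loop of Source B; loop counters i, j are
-- nonnegative Python ints, ported as Nat; left[i]/right[j] are always in range inside the
-- loop, ported with getD (exact); the trailing "merged + left[i:] + right[j:]" is the exit case
def pvMergeLoop (left right merged : List Int) (inv : Int) (i j : Nat) : List Int × Int :=
  if h : i < left.length ∧ j < right.length then
    if right.getD j 0 < left.getD i 0 then
      pvMergeLoop left right (merged ++ [right.getD j 0])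
        (inv + ((left.length : Int) - (i : Int))) i (j + 1)
    else
      pvMergeLoop left right (merged ++ [left.getD i 0]) inv (i + 1) j
  else (merged ++ left.drop i ++ right.drop j, inv)
termination_by (left.length - i) + (right.length - j)
decreasing_by all_goals omega

-- the midpoint len(xs)//2 as a Nat division (cited by pvSortCount's termination proof)
theorem pvMidEq (xs : List Int) :
    PySem.Int.floordiv (PySem.List.len xs) 2 = ((xs.length / 2 : Nat) : Int) := by
  rw [PySem.List.len_eq]
  exact_mod_cast PySem.Int.floordiv_natCast xs.length 2

def pvSortCount (xs : List Int) : List Int × Int :=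
  if xs.length ≤ 1 then (xs, 0)
  else
    let mid := PySem.Int.floordiv (PySem.List.len xs) 2
    let l := pvSortCount (PySem.List.slice xs none (some mid))
    let r := pvSortCount (PySem.List.slice xs (some mid) none)
    let m := pvMergeLoop l.1 r.1 [] 0 0 0
    (m.1, l.2 + r.2 + m.2)
termination_by xs.length
decreasing_by
  · simp only [pvMidEq, PySem.List.slice_to_natCast, List.length_take]
    omega
  · simp only [pvMidEq, PySem.List.slice_from_natCast, List.length_drop]
    omega

def short_bubble_sort_alt (alist : List Int) : List Int × Int := pvSortCount alist

-- ===== PRECONDITION & SPEC =====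
def Spec_short_bubble_sort (alist : List Int) (out : List Int × Int) : Prop := out = short_bubble_sort_alt alist
instance (alist : List Int) (out : List Int × Int) : Decidable (Spec_short_bubble_sort alist out) := by unfold Spec_short_bubble_sort; infer_instance

-- ===== CLAIM (what is proved, stated in full; the proofs are below) =====
def Claim_equal_short_bubble_sort : Prop := ∀ (alist : List Int), Dom_short_bubble_sort alist → Spec_short_bubble_sort alist (short_bubble_sort alist)

-- ===== LEMMAS AND PROOFS =====

-- number of inversions of a list
def pvInv : List Int → Nat
  | [] => 0
  | x :: xs => xs.countP (fun y => decide (y < x)) + pvInv xs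

-- one structural bubble pass: sorted-adjacent walk, counting swaps
def pvPass : List Int → List Int × Nat
  | x :: y :: r =>
    if y < x then let p := pvPass (x :: r); (y :: p.1, p.2 + 1)
    else let p := pvPass (y :: r); (x :: p.1, p.2)
  | l => (l, 0)

-- structural merge with inversion count
def pvMergeC : List Int → List Int → List Int × Nat
  | [], ys => (ys, 0)
  | xs, [] => (xs, 0)
  | x :: xs, y :: ys =>
    if y < x then let p := pvMergeC (x :: xs) ys; (y :: p.1, p.2 + (x :: xs).length)
    else let p := pvMergeC xs (y :: ys); (x :: p.1, p.2)

-- cross inversions between a left block and a right block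
def pvCross (L R : List Int) : Nat :=
  (L.map (fun x => R.countP (fun y => decide (y < x)))).sum

theorem pvPass_perm (l : List Int) : (pvPass l).1.Perm l := by
  fun_induction pvPass l with
  | case1 x y r h p ih => exact (ih.cons y).trans (List.Perm.swap x y r)
  | case2 x y r h p ih => exact ih.cons x
  | case3 l h => exact List.Perm.refl l

theorem pvPass_inv (l : List Int) : pvInv l = (pvPass l).2 + pvInv (pvPass l).1 := by
  fun_induction pvPass l with
  | case1 x y r h p ih =>
    have hc := (pvPass_perm (x :: r)).countP_eq (fun z => decide (z < y))
    have hxy : ¬ x < y := by omega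
    simp only [pvInv, List.countP_cons] at *
    simp [h, hxy] at *
    simp only [show p = pvPass (x :: r) from rfl]
    omega
  | case2 x y r h p ih =>
    have hc := (pvPass_perm (y :: r)).countP_eq (fun z => decide (z < x))
    simp only [pvInv, List.countP_cons] at *
    simp [h] at *
    simp only [show p = pvPass (y :: r) from rfl]
    omega
  | case3 l h => simp

theorem pvPass_sorted (l : List Int) (h : (pvPass l).2 = 0) :
    l.Pairwise (· ≤ ·) ∧ (pvPass l).1 = l := by
  revert h
  fun_induction pvPass l with
  | case1 x y r h p ih => intro hc; simp at hc
  | case2 x y r h p ih =>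
    intro hc
    obtain ⟨hs, he⟩ := ih hc
    refine ⟨List.Pairwise.cons ?_ hs, congrArg (x :: ·) he⟩
    intro z hz
    rcases List.mem_cons.1 hz with rfl | hz
    · omega
    · have := List.rel_of_pairwise_cons hs hz; omega
  | case3 l h =>
    intro _
    refine ⟨?_, rfl⟩
    match l, h with
    | [], _ => exact List.Pairwise.nil
    | [a], _ => simp
    | a :: b :: t, h => exact (h a b t rfl).elim

theorem pvPass_last (l : List Int) (h : l ≠ []) :
    ∃ ys m, (pvPass l).1 = ys ++ [m] ∧ ∀ a ∈ l, a ≤ m := by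
  revert h
  fun_induction pvPass l with
  | case1 x y r h p ih =>
    intro _
    obtain ⟨ys, m, h1, h2⟩ := ih (by simp)
    refine ⟨y :: ys, m, congrArg (y :: ·) h1, ?_⟩
    intro a ha
    rcases List.mem_cons.1 ha with rfl | ha
    · exact h2 a (by simp)
    rcases List.mem_cons.1 ha with rfl | ha
    · have := h2 x (by simp); omega
    · exact h2 a (by simp [ha])
  | case2 x y r h p ih =>
    intro _
    obtain ⟨ys, m, h1, h2⟩ := ih (by simp)
    refine ⟨x :: ys, m, congrArg (x :: ·) h1, ?_⟩
    intro a ha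
    rcases List.mem_cons.1 ha with rfl | ha
    · have := h2 y (by simp); omega
    · exact h2 a ha
  | case3 l h =>
    intro hne
    match l, h, hne with
    | [], _, hne => exact absurd rfl hne
    | [a], _, _ => exact ⟨[], a, rfl, by simp⟩
    | a :: b :: t, h, _ => exact (h a b t rfl).elim

theorem pvInv_sorted (l : List Int) (h : l.Pairwise (· ≤ ·)) : pvInv l = 0 := by
  induction l with
  | nil => rfl
  | cons x xs ih =>
    rcases List.pairwise_cons.1 h with ⟨hx, ht⟩
    have : xs.countP (fun y => decide (y < x)) = 0 :=
      List.countP_eq_zero.2 (fun y hy => by have := hx y hy; simp; omega)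
    simp [pvInv, this, ih ht]

theorem pvInv_append (X C : List Int) : pvInv (X ++ C) = pvInv X + pvInv C + pvCross X C := by
  induction X with
  | nil => simp [pvInv, pvCross]
  | cons x X ih => simp [pvInv, pvCross, List.countP_append, ih]; omega

theorem pvCross_perm {X X' : List Int} (C : List Int) (h : X.Perm X') :
    pvCross X C = pvCross X' C :=
  (h.map _).sum_eq

theorem pvCross_perm_right (X : List Int) {C C' : List Int} (h : C.Perm C') :
    pvCross X C = pvCross X C' := by
  unfold pvCross
  congr 1
  exact List.map_congr_left (fun x _ => h.countP_eq _)

theorem pvInner_eq (k : Nat) (front rest : List Int) (t : Int) (s : Bool)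
    (hk : k ≤ rest.length - 1) :
    (PySem.List.pyRange (front.length) (front.length + k) 1).foldl pvBubbleStep
        (front ++ rest, t, s)
      = (front ++ (pvPass (rest.take (k + 1))).1 ++ rest.drop (k + 1),
         t + ((pvPass (rest.take (k + 1))).2 : Int),
         s && ((pvPass (rest.take (k + 1))).2 == 0)) := by
  induction k generalizing front rest t s with
  | zero =>
    rw [show (front.length : Int) + (0 : Nat) = front.length by push_cast; ring,
      PySem.List.pyRange_one_eq_nil (le_refl _)]
    cases rest with
    | nil => simp [pvPass]
    | cons a t' => simp [pvPass]
  | succ k ih =>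
    match rest, hk with
    | a :: b :: r, hk =>
      have hlt : (front.length : Int) < front.length + ((k + 1 : Nat) : Int) := by push_cast; omega
      rw [PySem.List.pyRange_one_cons hlt, List.foldl_cons]
      have g1 : PySem.List.pyGetD (front ++ a :: b :: r) (front.length : Int) 0 = a := by
        simp [List.getD_eq_getElem?_getD]
      have g2 : PySem.List.pyGetD (front ++ a :: b :: r) ((front.length : Int) + 1) 0 = b := by
        rw [show ((front.length : Int) + 1) = ((front.length + 1 : Nat) : Int) by push_cast; ring,
          PySem.List.pyGetD_natCast]
        simp [List.getD_eq_getElem?_getD]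
      have htake : (a :: b :: r).take (k + 1 + 1) = a :: b :: r.take k := by simp
      have hdrop : (a :: b :: r).drop (k + 1 + 1) = r.drop k := by simp
      rw [htake, hdrop]
      by_cases hba : b < a
      · have hstep : pvBubbleStep (front ++ a :: b :: r, t, s) front.length
            = ((front ++ [b]) ++ a :: r, t + 1, false) := by
          simp only [pvBubbleStep, g1, g2, if_pos hba]
          refine congrArg (fun z => (z, t + 1, false)) ?_
          rw [PySem.List.pySetD_natCast,
            show ((front.length : Int) + 1) = ((front.length + 1 : Nat) : Int) by push_cast; ring,
            PySem.List.pySetD_natCast]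
          simp
        rw [hstep]
        have hrange : PySem.List.pyRange ((front.length : Int) + 1)
              ((front.length : Int) + ((k + 1 : Nat) : Int)) 1
            = PySem.List.pyRange (((front ++ [b]).length : Nat) : Int)
              ((((front ++ [b]).length : Nat) : Int) + (k : Nat)) 1 := by
          congr 1 <;> simp <;> ring
        rw [hrange, ih (front ++ [b]) (a :: r) (t + 1) false (by simp only [List.length_cons] at hk ⊢; omega)]
        have hpass : pvPass (a :: b :: r.take k)
            = (b :: (pvPass (a :: r.take k)).1, (pvPass (a :: r.take k)).2 + 1) := by
          simp [pvPass, hba]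
        rw [hpass]
        have h1 : (a :: r).take (k + 1) = a :: r.take k := by simp
        have h2 : (a :: r).drop (k + 1) = r.drop k := by simp
        rw [h1, h2]
        simp only [Prod.mk.injEq, List.append_assoc, List.singleton_append]
        refine ⟨trivial, ?_, ?_⟩
        · push_cast; ring
        · simp
      · have hstep : pvBubbleStep (front ++ a :: b :: r, t, s) front.length
            = ((front ++ [a]) ++ b :: r, t, s) := by
          simp only [pvBubbleStep, g1, g2, if_neg hba]
          simp
        rw [hstep]
        have hrange : PySem.List.pyRange ((front.length : Int) + 1)
              ((front.length : Int) + ((k + 1 : Nat) : Int)) 1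
            = PySem.List.pyRange (((front ++ [a]).length : Nat) : Int)
              ((((front ++ [a]).length : Nat) : Int) + (k : Nat)) 1 := by
          congr 1 <;> simp <;> ring
        rw [hrange, ih (front ++ [a]) (b :: r) t s (by simp only [List.length_cons] at hk ⊢; omega)]
        have hpass : pvPass (a :: b :: r.take k)
            = (a :: (pvPass (b :: r.take k)).1, (pvPass (b :: r.take k)).2) := by
          simp [pvPass, hba]
        rw [hpass]
        simp

theorem pvOuter_eq (pos : Int) (l : List Int) (s : Bool) (t : Int)
    (hp : pos ≤ (l.length : Int) - 1)
    (hs : s = true → l.Pairwise (· ≤ ·))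
    (h1 : (l.drop (pos.toNat + 1)).Pairwise (· ≤ ·))
    (h2 : ∀ x ∈ l.take (pos.toNat + 1), ∀ y ∈ l.drop (pos.toNat + 1), x ≤ y) :
    (pvBubbleLoop l s t pos).1.Perm l ∧ (pvBubbleLoop l s t pos).1.Pairwise (· ≤ ·) ∧
      (pvBubbleLoop l s t pos).2 = t + (pvInv l : Int) := by
  revert hp hs h1 h2
  fun_induction pvBubbleLoop l s t pos with
  | case1 l s t pos h st ih =>
    intro hp hs h1 h2
    obtain ⟨hpos, hsf⟩ := h
    have hkpos : pos = (pos.toNat : Int) := (Int.toNat_of_nonneg (by omega)).symm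
    set k := pos.toNat with hkdef
    have hk1 : 1 ≤ k := by omega
    have hkl : k + 1 ≤ l.length := by omega
    have hst : st = ((pvPass (l.take (k + 1))).1 ++ l.drop (k + 1),
        t + ((pvPass (l.take (k + 1))).2 : Int),
        ((pvPass (l.take (k + 1))).2 == 0)) := by
      show (PySem.List.pyRange 0 pos 1).foldl pvBubbleStep (l, t, true) = _
      have hfold := pvInner_eq k [] l t true (by omega)
      simp only [List.nil_append, List.length_nil, Nat.cast_zero, zero_add,
        Bool.true_and] at hfold
      rw [hkpos, hfold]
    set P := pvPass (l.take (k + 1)) with hP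
    have hlen : P.1.length = k + 1 := by
      rw [(pvPass_perm (l.take (k + 1))).length_eq, List.length_take]
      omega
    have hlL' : (P.1 ++ l.drop (k + 1)).length = l.length := by
      simp [hlen]; omega
    have hpermL' : (P.1 ++ l.drop (k + 1)).Perm l := by
      refine ((pvPass_perm _).append (List.Perm.refl _)).trans ?_
      rw [List.take_append_drop]
    have hinv : pvInv l = P.2 + pvInv (P.1 ++ l.drop (k + 1)) := by
      have e1 := pvInv_append (l.take (k + 1)) (l.drop (k + 1))
      rw [List.take_append_drop] at e1
      have e2 := pvInv_append P.1 (l.drop (k + 1))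
      have e3 := pvPass_inv (l.take (k + 1))
      have e4 := pvCross_perm (l.drop (k + 1)) (pvPass_perm (l.take (k + 1)))
      rw [← hP] at e3 e4
      omega
    -- the element bubbled to position k, and the prefix before it
    have hTne : l.take (k + 1) ≠ [] := by
      apply List.ne_nil_of_length_pos
      rw [List.length_take]
      omega
    obtain ⟨ys, m, hys, hm⟩ := pvPass_last (l.take (k + 1)) hTne
    rw [← hP] at hys
    have hyslen : ys.length = k := by
      have := hlen
      rw [hys] at this
      simp at this
      omega
    have hmem : ∀ x ∈ P.1, x ∈ l.take (k + 1) :=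
      fun x hx => (pvPass_perm (l.take (k + 1))).subset (by rw [← hP]; exact hx)
    have hdropk : (P.1 ++ l.drop (k + 1)).drop k = m :: l.drop (k + 1) := by
      rw [hys, List.append_assoc, ← hyslen, List.drop_left]
      rfl
    have htakek : (P.1 ++ l.drop (k + 1)).take k = ys := by
      rw [hys, List.append_assoc, ← hyslen, List.take_left]
    simp only [hst] at ih ⊢
    have hconcl := ih
      (by rw [hlL']; omega)
      (by
        intro hq
        have hcnt0 : P.2 = 0 := by simpa using hq
        obtain ⟨hsorted, heq⟩ := pvPass_sorted (l.take (k + 1)) (by rw [← hP]; exact hcnt0)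
        rw [← hP] at heq
        rw [heq]
        rw [List.pairwise_append]
        refine ⟨hsorted, ?_, ?_⟩
        · exact h1
        · exact h2)
      (by
        have hidx : (pos - 1).toNat + 1 = k := by omega
        rw [hidx, hdropk]
        refine List.Pairwise.cons ?_ h1
        intro y hy
        exact h2 m (hmem m (by rw [hys]; simp)) y hy)
      (by
        have hidx : (pos - 1).toNat + 1 = k := by omega
        rw [hidx, hdropk, htakek]
        intro x hx y hy
        have hxT : x ∈ l.take (k + 1) := hmem x (by rw [hys]; exact List.mem_append_left _ hx)
        rcases List.mem_cons.1 hy with rfl | hy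
        · exact hm x hxT
        · exact h2 x hxT y hy)
    obtain ⟨c1, c2, c3⟩ := hconcl
    refine ⟨c1.trans hpermL', c2, ?_⟩
    rw [c3]
    have : (pvInv l : Int) = (P.2 : Int) + (pvInv (P.1 ++ l.drop (k + 1)) : Int) := by
      exact_mod_cast hinv
    omega
  | case2 l s t pos h =>
    intro hp hs h1 h2
    have hsorted : l.Pairwise (· ≤ ·) := by
      by_cases hstrue : s = true
      · exact hs hstrue
      · have hpos : pos ≤ 0 := by
          rcases Decidable.not_and_iff_or_not.1 h with h' | h'
          · omega
          · cases s
            · exact absurd rfl h'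
            · exact absurd rfl hstrue
        have h0 : pos.toNat = 0 := by omega
        rw [h0] at h1 h2
        cases l with
        | nil => exact List.Pairwise.nil
        | cons a t' =>
          refine List.Pairwise.cons ?_ (by simpa using h1)
          intro y hy
          exact h2 a (by simp) y (by simpa using hy)
    exact ⟨List.Perm.refl l, hsorted, by rw [pvInv_sorted l hsorted]; simp⟩

theorem pvMergeC_nil_right (xs : List Int) : pvMergeC xs [] = (xs, 0) := by
  cases xs <;> simp [pvMergeC]

-- cross inversions with an element consed on the right block
theorem pvCross_cons_right (X : List Int) (y : Int) (C : List Int) :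
    pvCross X (y :: C) = X.countP (fun a => decide (y < a)) + pvCross X C := by
  induction X with
  | nil => simp [pvCross]
  | cons x X ih =>
    simp only [pvCross, List.map_cons, List.sum_cons, List.countP_cons] at *
    omega

theorem pvMergeLoop_eq (left right : List Int) :
    ∀ (i j : Nat) (merged : List Int) (inv : Int),
      pvMergeLoop left right merged inv i j
        = (merged ++ (pvMergeC (left.drop i) (right.drop j)).1,
           inv + ((pvMergeC (left.drop i) (right.drop j)).2 : Int)) := by
  intro i j merged inv
  fun_induction pvMergeLoop left right merged inv i j with
  | case1 merged inv i j h hc ih =>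
    have hdi : left.drop i = left[i] :: left.drop (i + 1) := List.drop_eq_getElem_cons h.1
    have hdj : right.drop j = right[j] :: right.drop (j + 1) := List.drop_eq_getElem_cons h.2
    have hgi : left.getD i 0 = left[i] := List.getD_eq_getElem left 0 h.1
    have hgj : right.getD j 0 = right[j] := List.getD_eq_getElem right 0 h.2
    rw [ih, hdi, hdj]
    simp only [pvMergeC]
    rw [if_pos (by rw [hgi, hgj] at hc; exact hc), ← hdi]
    simp only [hgj, List.append_assoc, List.singleton_append,
      List.length_drop, Prod.mk.injEq]
    refine ⟨trivial, ?_⟩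
    push_cast
    have := h.1
    omega
  | case2 merged inv i j h hc ih =>
    have hdi : left.drop i = left[i] :: left.drop (i + 1) := List.drop_eq_getElem_cons h.1
    have hdj : right.drop j = right[j] :: right.drop (j + 1) := List.drop_eq_getElem_cons h.2
    have hgi : left.getD i 0 = left[i] := List.getD_eq_getElem left 0 h.1
    have hgj : right.getD j 0 = right[j] := List.getD_eq_getElem right 0 h.2
    rw [ih, hdi, hdj]
    simp only [pvMergeC]
    rw [if_neg (by rw [hgi, hgj] at hc; exact hc), ← hdj]
    simp only [hgi, List.append_assoc, List.singleton_append]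
  | case3 merged inv i j h =>
    rcases Decidable.not_and_iff_or_not.1 h with h' | h'
    · have : left.drop i = [] := List.drop_eq_nil_of_le (by omega)
      simp [this, pvMergeC]
    · have hj : right.drop j = [] := List.drop_eq_nil_of_le (by omega)
      simp [hj, pvMergeC_nil_right]

theorem pvMergeC_perm (xs ys : List Int) : (pvMergeC xs ys).1.Perm (xs ++ ys) := by
  fun_induction pvMergeC xs ys with
  | case1 ys => simp
  | case2 xs h => simp
  | case3 x xs y ys h p ih => exact (ih.cons y).trans List.perm_middle.symm
  | case4 x xs y ys h p ih => exact ih.cons x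

theorem pvMergeC_sorted (xs ys : List Int) (hx : xs.Pairwise (· ≤ ·))
    (hy : ys.Pairwise (· ≤ ·)) : (pvMergeC xs ys).1.Pairwise (· ≤ ·) := by
  revert hx hy
  fun_induction pvMergeC xs ys with
  | case1 ys => intro _ hy; exact hy
  | case2 xs h => intro hx _; exact hx
  | case3 x xs y ys h p ih =>
    intro hx hy
    rcases List.pairwise_cons.1 hy with ⟨hy1, hy2⟩
    refine List.Pairwise.cons ?_ (ih hx hy2)
    intro b hb
    have hb' : b ∈ (x :: xs) ++ ys := (pvMergeC_perm (x :: xs) ys).subset hb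
    rcases List.mem_append.1 hb' with hb' | hb'
    · rcases List.mem_cons.1 hb' with rfl | hb'
      · omega
      · have := List.rel_of_pairwise_cons hx hb'; omega
    · exact hy1 b hb'
  | case4 x xs y ys h p ih =>
    intro hx hy
    rcases List.pairwise_cons.1 hx with ⟨hx1, hx2⟩
    refine List.Pairwise.cons ?_ (ih hx2 hy)
    intro b hb
    have hb' : b ∈ xs ++ (y :: ys) := (pvMergeC_perm xs (y :: ys)).subset hb
    rcases List.mem_append.1 hb' with hb' | hb'
    · exact hx1 b hb'
    · rcases List.mem_cons.1 hb' with rfl | hb'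
      · omega
      · have := List.rel_of_pairwise_cons hy hb'; omega

theorem pvMergeC_count (xs ys : List Int) (hx : xs.Pairwise (· ≤ ·))
    (hy : ys.Pairwise (· ≤ ·)) : (pvMergeC xs ys).2 = pvCross xs ys := by
  revert hx hy
  fun_induction pvMergeC xs ys with
  | case1 ys => intro _ _; simp [pvCross]
  | case2 xs h => intro _ _; simp [pvCross]
  | case3 x xs y ys h p ih =>
    intro hx hy
    have hall : (x :: xs).countP (fun a => decide (y < a)) = (x :: xs).length :=
      List.countP_eq_length.2 (fun a ha => by
        rcases List.mem_cons.1 ha with rfl | ha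
        · simpa using h
        · have := List.rel_of_pairwise_cons hx ha; simp; omega)
    rw [pvCross_cons_right, hall]
    have := ih hx (List.pairwise_cons.1 hy).2
    simp only [show p = pvMergeC (x :: xs) ys from rfl, this]
    omega
  | case4 x xs y ys h p ih =>
    intro hx hy
    have hzero : (y :: ys).countP (fun b => decide (b < x)) = 0 :=
      List.countP_eq_zero.2 (fun b hb => by
        rcases List.mem_cons.1 hb with rfl | hb
        · simp; omega
        · have := List.rel_of_pairwise_cons hy hb; simp; omega)
    have := ih (List.pairwise_cons.1 hx).2 hy
    simp only [pvCross, List.map_cons, List.sum_cons]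
    simp only [pvCross] at this
    simp only [show p = pvMergeC xs (y :: ys) from rfl, this, hzero]
    omega

theorem pvSortCount_spec (xs : List Int) :
    (pvSortCount xs).1.Perm xs ∧ (pvSortCount xs).1.Pairwise (· ≤ ·) ∧
      (pvSortCount xs).2 = (pvInv xs : Int) := by
  fun_induction pvSortCount xs with
  | case1 xs h =>
    refine ⟨List.Perm.refl xs, ?_, ?_⟩
    · match xs, h with
      | [], _ => exact List.Pairwise.nil
      | [a], _ => simp
    · match xs, h with
      | [], _ => simp [pvInv]
      | [a], _ => simp [pvInv]
  | case2 xs h mid l r m ihl ihr =>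
    have hL : PySem.List.slice xs none (some mid) = xs.take (xs.length / 2) := by
      show PySem.List.slice xs none (some (PySem.Int.floordiv (PySem.List.len xs) 2)) = _
      rw [pvMidEq xs]; exact PySem.List.slice_to_natCast xs (xs.length / 2)
    have hR : PySem.List.slice xs (some mid) none = xs.drop (xs.length / 2) := by
      show PySem.List.slice xs (some (PySem.Int.floordiv (PySem.List.len xs) 2)) none = _
      rw [pvMidEq xs]; exact PySem.List.slice_from_natCast xs (xs.length / 2)
    have hle : l = pvSortCount (xs.take (xs.length / 2)) := by
      show pvSortCount (PySem.List.slice xs none (some mid)) = _; rw [hL]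
    have hre : r = pvSortCount (xs.drop (xs.length / 2)) := by
      show pvSortCount (PySem.List.slice xs (some mid) none) = _; rw [hR]
    have hm : m = ((pvMergeC l.1 r.1).1, ((pvMergeC l.1 r.1).2 : Int)) := by
      show pvMergeLoop l.1 r.1 [] 0 0 0 = _
      rw [pvMergeLoop_eq]
      simp
    rw [hL] at ihl
    rw [hR] at ihr
    obtain ⟨pl, sl, cl⟩ := ihl
    obtain ⟨pr, sr, cr⟩ := ihr
    rw [hle] at hm
    rw [hre] at hm
    refine ⟨?_, ?_, ?_⟩
    · show m.1.Perm xs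
      rw [hm]
      refine ((pvMergeC_perm _ _).trans (pl.append pr)).trans ?_
      rw [List.take_append_drop]
    · show m.1.Pairwise (· ≤ ·)
      rw [hm]
      exact pvMergeC_sorted _ _ sl sr
    · show l.2 + r.2 + m.2 = (pvInv xs : Int)
      rw [hm, hle, hre, cl, cr]
      have hcnt : (pvMergeC (pvSortCount (xs.take (xs.length / 2))).1
            (pvSortCount (xs.drop (xs.length / 2))).1).2
          = pvCross (xs.take (xs.length / 2)) (xs.drop (xs.length / 2)) := by
        rw [pvMergeC_count _ _ sl sr, pvCross_perm _ pl, pvCross_perm_right _ pr]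
      have hinv := pvInv_append (xs.take (xs.length / 2)) (xs.drop (xs.length / 2))
      rw [List.take_append_drop] at hinv
      simp only [hcnt, hinv]
      push_cast
      ring

-- ===== VERDICT (by name: the statement is the Claim_ definition above) =====
theorem short_bubble_sort_spec : Claim_equal_short_bubble_sort := by
  intro alist _
  show short_bubble_sort alist = short_bubble_sort_alt alist
  show pvBubbleLoop alist false 0 (PySem.List.len alist - 1) = pvSortCount alist
  rw [PySem.List.len_eq]
  have hdropnil : alist.drop (((alist.length : Int) - 1).toNat + 1) = [] :=
    List.drop_eq_nil_of_le (by omega)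
  have hA := pvOuter_eq ((alist.length : Int) - 1) alist false 0
    (by omega)
    (by intro h; simp at h)
    (by rw [hdropnil]; exact List.Pairwise.nil)
    (by intro x hx y hy; rw [hdropnil] at hy; simp at hy)
  obtain ⟨pa, sa, ca⟩ := hA
  obtain ⟨pb, sb, cb⟩ := pvSortCount_spec alist
  have hfst : (pvBubbleLoop alist false 0 ((alist.length : Int) - 1)).1
      = (pvSortCount alist).1 :=
    (pa.trans pb.symm).eq_of_pairwise (fun a b _ _ h1 h2 => le_antisymm h1 h2) sa sb
  have hsnd : (pvBubbleLoop alist false 0 ((alist.length : Int) - 1)).2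
      = (pvSortCount alist).2 := by
    rw [ca, cb]
    ring
  exact Prod.ext hfst hsnd
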